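-- pv_equiv track=rewrite | github.com/nsanch/aoc | 2024/day14/day14.py | look_in_string_for_sequence
-- ===== SOURCE A (Python) =====
-- def look_in_string_for_sequence(s):
--   longest_run = 0
--   i = 0
--   in_run = False
--   curr_run = 0
--   while i < len(s):
--     if s[i] != ".":
--       if in_run:
--         curr_run += 1
--       else:
--         in_run = True
--         curr_run = 1
--     else:
--       if in_run:
--         if curr_run > longest_run:
--           longest_run = curr_run
--         in_run = False
--     i += 1
--
--   return longest_run
-- ===== SOURCE B (Python) =====
-- def look_in_string_for_sequence(s):
--   # lengths of the maximal non-'.' segments; the last segment is the trailing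
--   # one (not terminated by a '.'), which the function does not count
--   return max((len(p) for p in s.split(".")[:-1]), default=0)
-- ===== Notes on version B (the rewrite author's own statement) =====
-- stated objective: simpler
-- what changed: Replaces the explicit character-by-character state machine (index, in_run flag, run counter) by one expression: split on '.', drop the trailing segment, take the max segment length with default 0.
import Mathlib
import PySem

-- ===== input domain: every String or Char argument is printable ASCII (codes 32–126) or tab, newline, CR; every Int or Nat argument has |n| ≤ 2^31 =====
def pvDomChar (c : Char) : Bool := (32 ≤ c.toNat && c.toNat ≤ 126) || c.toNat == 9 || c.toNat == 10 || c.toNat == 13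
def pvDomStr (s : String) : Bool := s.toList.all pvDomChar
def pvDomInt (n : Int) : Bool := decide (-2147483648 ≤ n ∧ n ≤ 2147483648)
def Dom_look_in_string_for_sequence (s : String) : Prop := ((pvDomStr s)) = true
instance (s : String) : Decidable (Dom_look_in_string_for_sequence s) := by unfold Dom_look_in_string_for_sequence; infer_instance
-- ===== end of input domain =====

-- ===== PORT A =====
-- B differs: one split-and-max expression instead of A's character state machine (objective: simpler).
-- A's while loop over the characters, carried state (longest_run, in_run, curr_run)
def pvALoop : List Char → Int → Bool → Int → Int
  | [], longest, _, _ => longest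
  | ch :: rest, longest, inRun, curr =>
    if ch ≠ '.' then
      if inRun then pvALoop rest longest true (curr + 1)
      else pvALoop rest longest true 1
    else
      if inRun then
        pvALoop rest (if curr > longest then curr else longest) false curr
      else pvALoop rest longest false curr

def look_in_string_for_sequence (s : String) : Int :=
  pvALoop s.toList 0 false 0

-- ===== PORT B =====
-- lengths of s.split(".")[:-1] (segments terminated by a '.'), then Python max(…, default=0)
def look_in_string_for_sequence_alt (s : String) : Int :=
  match ((List.splitOn '.' s.toList).dropLast).map (fun p => (p.length : Int)) with
  | [] => 0
  | x :: xs => xs.foldl max x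

-- ===== PRECONDITION & SPEC =====
def Spec_look_in_string_for_sequence (s : String) (out : Int) : Prop := out = look_in_string_for_sequence_alt s
instance (s : String) (out : Int) : Decidable (Spec_look_in_string_for_sequence s out) := by unfold Spec_look_in_string_for_sequence; infer_instance

-- ===== CLAIM (what is proved, stated in full; the proofs are below) =====
def Claim_equal_look_in_string_for_sequence : Prop := ∀ (s : String), Dom_look_in_string_for_sequence s → Spec_look_in_string_for_sequence s (look_in_string_for_sequence s)


-- ===== LEMMAS AND PROOFS =====

-- lengths of the dot-terminated segments of cs
def pvSegs (cs : List Char) : List Int :=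
  ((List.splitOn '.' cs).dropLast).map (fun p => (p.length : Int))

theorem pvSegs_eq (cs : List Char) :
    pvSegs cs = ((List.splitOnP (· == '.') cs).dropLast).map (fun p => (p.length : Int)) := by
  simp [pvSegs, List.splitOn]

theorem pvSegs_nil : pvSegs [] = [] := by simp [pvSegs_eq, List.splitOnP_nil]

theorem pvSegs_dot (cs : List Char) : pvSegs ('.' :: cs) = 0 :: pvSegs cs := by
  simp only [pvSegs_eq, List.splitOnP_cons, beq_self_eq_true, if_pos]
  rw [List.dropLast_cons_of_ne_nil (List.splitOnP_ne_nil _ _)]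
  simp

theorem pvSegs_cons (ch : Char) (cs : List Char) (h : ch ≠ '.') :
    pvSegs (ch :: cs) = match pvSegs cs with
      | [] => []
      | d :: ds => (1 + d) :: ds := by
  simp only [pvSegs_eq, List.splitOnP_cons, beq_iff_eq, if_neg h]
  obtain ⟨p, rest, hp⟩ : ∃ p rest, List.splitOnP (· == '.') cs = p :: rest := by
    cases hx : List.splitOnP (· == '.') cs with
    | nil => exact absurd hx (List.splitOnP_ne_nil _ _)
    | cons p rest => exact ⟨p, rest, rfl⟩
  rw [hp]
  cases rest with
  | nil => simp
  | cons q qs =>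
      rw [List.modifyHead_cons,
          List.dropLast_cons_of_ne_nil (by simp : (q :: qs : List (List Char)) ≠ []),
          List.dropLast_cons_of_ne_nil (by simp : (q :: qs : List (List Char)) ≠ [])]
      simp [add_comm]

theorem pvALoop_dot (cs : List Char) (L : Int) (b : Bool) (c : Int) :
    pvALoop ('.' :: cs) L b c =
      if b then pvALoop cs (if c > L then c else L) false c else pvALoop cs L false c := by
  simp [pvALoop]

theorem pvALoop_ne (ch : Char) (cs : List Char) (L : Int) (b : Bool) (c : Int)
    (h : ch ≠ '.') :
    pvALoop (ch :: cs) L b c =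
      if b then pvALoop cs L true (c + 1) else pvALoop cs L true 1 := by
  simp [pvALoop, h]

-- the loop, characterised by the segment lengths (both flag values at once)
theorem pvALoop_char (cs : List Char) :
    (∀ (L c : Int), 0 ≤ L → pvALoop cs L false c = (pvSegs cs).foldl max L) ∧
    (∀ (L c : Int), 0 ≤ L → pvALoop cs L true c =
      match pvSegs cs with
      | [] => L
      | d :: ds => ((c + d) :: ds).foldl max L) := by
  induction cs with
  | nil => simp [pvALoop, pvSegs_nil]
  | cons ch cs ih =>
      by_cases hch : ch = '.'
      · subst hch
        refine ⟨fun L c hL => ?_, fun L c hL => ?_⟩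
        · rw [pvALoop_dot, if_neg (by simp), (ih.1) L c hL, pvSegs_dot, List.foldl_cons]
          congr 1
          omega
        · rw [pvALoop_dot, if_pos rfl, (ih.1) (if c > L then c else L) c (by omega),
              pvSegs_dot]
          show _ = List.foldl max L ((c + 0) :: pvSegs cs)
          rw [List.foldl_cons]
          congr 1
          omega
      · refine ⟨fun L c hL => ?_, fun L c hL => ?_⟩
        · rw [pvALoop_ne ch cs L false c hch, if_neg (by simp), (ih.2) L 1 hL,
              pvSegs_cons ch cs hch]
          cases h : pvSegs cs with
          | nil => simp
          | cons d ds => simp only [List.foldl_cons]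
        · rw [pvALoop_ne ch cs L true c hch, if_pos rfl, (ih.2) L (c + 1) hL,
              pvSegs_cons ch cs hch]
          cases h : pvSegs cs with
          | nil => simp
          | cons d ds =>
              simp only [List.foldl_cons]
              congr 2
              omega

theorem pvSegs_head_nonneg (cs : List Char) (x : Int) (xs : List Int)
    (h : pvSegs cs = x :: xs) : 0 ≤ x := by
  have hm : x ∈ pvSegs cs := by rw [h]; exact List.mem_cons_self
  simp only [pvSegs] at hm
  obtain ⟨p, _, hp⟩ := List.mem_map.1 hm
  omega

-- ===== VERDICT (by name: the statement is the Claim_ definition above) =====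
theorem look_in_string_for_sequence_spec : Claim_equal_look_in_string_for_sequence := by
  intro s _
  unfold Spec_look_in_string_for_sequence look_in_string_for_sequence
  rw [(pvALoop_char s.toList).1 0 0 (le_refl 0)]
  show (pvSegs s.toList).foldl max 0 = look_in_string_for_sequence_alt s
  unfold look_in_string_for_sequence_alt
  cases h : pvSegs s.toList with
  | nil =>
      have h' : ((List.splitOn '.' s.toList).dropLast).map (fun p => (p.length : Int)) = [] := h
      simp [h']
  | cons x xs =>
      have h' : ((List.splitOn '.' s.toList).dropLast).map (fun p => (p.length : Int)) = x :: xs := h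
      have hx := pvSegs_head_nonneg s.toList x xs h
      simp only [h', List.foldl_cons]
      congr 1
      omega
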